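-- pv_equiv track=rewrite | github.com/AlifSrSE/ProblemSolves | 1400F-xPrimeSubstring.py | is_x_prime
-- ===== SOURCE A (Python) =====
-- def is_x_prime(s, l, r, x, divisors):
--     substring_sum = sum(int(s[i]) for i in range(l, r + 1))
--     if substring_sum != x:
--         return False
--     for l2 in range(l, r + 1):
--         for r2 in range(l2, r + 1):
--             if l2 == l and r2 == r:
--                 continue
--             sub_sum = sum(int(s[i]) for i in range(l2, r2 + 1))
--             if sub_sum != x and sub_sum in divisors:
--                 return False
--     return True
-- ===== SOURCE B (Python) =====
-- def is_x_prime(s, l, r, x, divisors):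
--     digits = [int(s[i]) for i in range(l, r + 1)]
--     pref = [0]
--     for d in digits:
--         pref.append(pref[-1] + d)
--     if pref[-1] != x:
--         return False
--     dset = set(divisors)
--     n = len(digits)
--     for i in range(n):
--         for j in range(i + 1, n + 1):
--             if i == 0 and j == n:
--                 continue
--             d = pref[j] - pref[i]
--             if d != x and d in dset:
--                 return False
--     return True
-- ===== Notes on version B (the rewrite author's own statement) =====
-- stated objective: faster
-- what changed: B extracts the digits once, builds a prefix-sum array so every substring sum is a single subtraction instead of an inner summation loop, and tests membership in a set of the divisors instead of the list.
import Mathlib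
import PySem

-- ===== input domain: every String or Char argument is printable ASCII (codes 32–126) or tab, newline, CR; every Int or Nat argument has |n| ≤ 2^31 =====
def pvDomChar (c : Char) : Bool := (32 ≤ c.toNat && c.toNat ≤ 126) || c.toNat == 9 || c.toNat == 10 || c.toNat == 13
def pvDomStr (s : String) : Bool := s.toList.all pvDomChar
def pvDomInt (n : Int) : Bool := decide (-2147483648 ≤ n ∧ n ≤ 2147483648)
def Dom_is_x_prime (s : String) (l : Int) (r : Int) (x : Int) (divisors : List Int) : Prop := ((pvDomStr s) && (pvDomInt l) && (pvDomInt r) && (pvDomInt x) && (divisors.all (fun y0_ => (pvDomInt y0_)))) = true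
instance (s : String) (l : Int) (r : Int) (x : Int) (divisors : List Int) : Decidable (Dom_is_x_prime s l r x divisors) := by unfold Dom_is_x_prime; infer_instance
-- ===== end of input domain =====

-- B builds a prefix-sum array once so each substring sum is one subtraction (O(n^2) instead of A's O(n^3)); return values agree on Pre_.

-- shared helper: int(s[i]) (total under Pre_, where s[i] exists and is a digit)
def pvDig (s : String) (i : Int) : Int :=
  match PySem.Str.pyGet? s i with
  | some c => (PySem.Int.ofChars? [c]).getD 0
  | none => 0

-- ===== PORT A =====
def is_x_prime (s : String) (l : Int) (r : Int) (x : Int) (divisors : List Int) : Bool :=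
  let substring_sum := ((PySem.List.pyRange l (r + 1) 1).map (pvDig s)).sum
  if substring_sum ≠ x then false
  else
    (PySem.List.pyRange l (r + 1) 1).all (fun l2 =>
      (PySem.List.pyRange l2 (r + 1) 1).all (fun r2 =>
        if l2 = l ∧ r2 = r then true
        else
          let sub_sum := ((PySem.List.pyRange l2 (r2 + 1) 1).map (pvDig s)).sum
          !(decide (sub_sum ≠ x) && decide (sub_sum ∈ divisors))))

-- ===== PORT B =====
def is_x_prime_alt (s : String) (l : Int) (r : Int) (x : Int) (divisors : List Int) : Bool :=
  let digits := (PySem.List.pyRange l (r + 1) 1).map (pvDig s)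
  let pref := digits.foldl (fun acc d => acc ++ [(PySem.List.pyGetD acc (-1) 0) + d]) [0]
  if PySem.List.pyGetD pref (-1) 0 ≠ x then false
  else
    let dset := PySem.Set.ofList divisors
    let n := digits.length
    (PySem.List.pyRange 0 (n : Int) 1).all (fun i =>
      (PySem.List.pyRange (i + 1) ((n : Int) + 1) 1).all (fun j =>
        if i = 0 ∧ j = (n : Int) then true
        else
          let d := PySem.List.pyGetD pref j 0 - PySem.List.pyGetD pref i 0
          !(decide (d ≠ x) && decide (d ∈ dset))))

-- ===== PRECONDITION & SPEC =====
-- Pre_: either the index range l..r is empty, or every index l..r is a valid Python index into s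
-- (stated as the closed-form bounds -len <= l and r < len) and each character there is an ASCII digit;
-- elsewhere both programs raise (IndexError / ValueError in int(s[i])).
def Pre_is_x_prime (s : String) (l : Int) (r : Int) (x : Int) (divisors : List Int) : Prop :=
  r + 1 ≤ l ∨
    (-(PySem.Str.len s) ≤ l ∧ r < PySem.Str.len s ∧
      ((PySem.List.pyRange l (r + 1) 1).all (fun i =>
        ((PySem.Str.pyGet? s i).map (fun c => c.isDigit)).getD false)) = true)
instance (s : String) (l : Int) (r : Int) (x : Int) (divisors : List Int) : Decidable (Pre_is_x_prime s l r x divisors) := by unfold Pre_is_x_prime; infer_instance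

def pvWitness_is_x_prime : String × Int × Int × Int × List Int := ("10", 0, 1, 1, [])

def Spec_is_x_prime (s : String) (l : Int) (r : Int) (x : Int) (divisors : List Int) (out : Bool) : Prop := out = is_x_prime_alt s l r x divisors
instance (s : String) (l : Int) (r : Int) (x : Int) (divisors : List Int) (out : Bool) : Decidable (Spec_is_x_prime s l r x divisors out) := by unfold Spec_is_x_prime; infer_instance

-- ===== CLAIM (what is proved, stated in full; the proofs are below) =====
def Claim_equal_is_x_prime : Prop := ∀ (s : String) (l : Int) (r : Int) (x : Int) (divisors : List Int), Dom_is_x_prime s l r x divisors → Pre_is_x_prime s l r x divisors → Spec_is_x_prime s l r x divisors (is_x_prime s l r x divisors)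

-- ===== LEMMAS AND PROOFS =====

-- B's prefix-sum loop builds exactly the list of partial sums of ds
theorem prefFold_eq (ds : List Int) :
    ds.foldl (fun acc d => acc ++ [(PySem.List.pyGetD acc (-1) 0) + d]) [0]
      = (List.range (ds.length + 1)).map (fun k => (ds.take k).sum) := by
  induction ds using List.reverseRecOn with
  | nil => simp
  | append_singleton ds d ih =>
    have hlast : PySem.List.pyGetD ((List.range (ds.length+1)).map (fun k => (ds.take k).sum)) (-1) 0 = ds.sum := by
      rw [List.range_succ, List.map_append, List.map_cons, List.map_nil,
          PySem.List.pyGetD_neg_one_append_singleton]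
      simp
    rw [List.foldl_append, ih, List.foldl_cons, List.foldl_nil, hlast]
    rw [show (ds ++ [d]).length + 1 = (ds.length + 1) + 1 by simp,
        List.range_succ (n := ds.length + 1), List.map_append]
    congr 1
    · exact List.map_congr_left fun k hk => by
        simp only [List.mem_range] at hk
        rw [List.take_append_of_le_length (by omega)]
    · simp

-- pref[-1] is the sum of all digits
theorem pref_last (ds : List Int) :
    PySem.List.pyGetD ((List.range (ds.length+1)).map (fun k => (ds.take k).sum)) (-1) 0 = ds.sum := by
  rw [List.range_succ, List.map_append, List.map_cons, List.map_nil,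
      PySem.List.pyGetD_neg_one_append_singleton]
  simp

-- a take of a mapped range is the map of the shorter range
theorem take_map_pyRange {α : Type} (f : Int → α) (l a b : Int) (h1 : l ≤ a) (h2 : a ≤ b) :
    (((PySem.List.pyRange l b 1).map f).take (a - l).toNat) = (PySem.List.pyRange l a 1).map f := by
  rw [PySem.List.pyRange_one_append l a b h1 h2, List.map_append]
  exact List.take_left' (by simp [PySem.List.length_pyRange_one])

-- difference of two prefix takes = sum over the inner range
theorem sub_sum_eq' (f : Int → Int) (l r i j : Int) (hi : 0 ≤ i) (hij : i ≤ j) (hj : l + j ≤ r + 1) :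
    ((((PySem.List.pyRange l (r+1) 1).map f).take j.toNat).sum
      - (((PySem.List.pyRange l (r+1) 1).map f).take i.toNat).sum)
      = ((PySem.List.pyRange (l+i) (l+j) 1).map f).sum := by
  have e1 : j.toNat = ((l+j) - l).toNat := by omega
  have e2 : i.toNat = ((l+i) - l).toNat := by omega
  rw [e1, e2, take_map_pyRange f l (l+j) (r+1) (by omega) hj,
      take_map_pyRange f l (l+i) (r+1) (by omega) (by omega),
      PySem.List.pyRange_one_append l (l+i) (l+j) (by omega) (by omega), List.map_append,
      List.sum_append]
  ring

-- indexing B's prefix-sum list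
theorem pref_getD (ds : List Int) (j : Int) (h0 : 0 ≤ j) (h1 : j ≤ ds.length) :
    PySem.List.pyGetD ((List.range (ds.length + 1)).map (fun k => (ds.take k).sum)) j 0
      = (ds.take j.toNat).sum := by
  rw [PySem.List.pyGetD_eq_getElem _ 0 h0 (by simp; omega)]
  simp

-- pref[j] - pref[i] is the substring sum A computes for the range [l+i, l+j)
theorem pref_diff (s : String) (l r i j : Int) (hi : 0 ≤ i) (hij : i ≤ j)
    (hj : l + j ≤ r + 1) :
    (PySem.List.pyGetD ((List.range (((PySem.List.pyRange l (r+1) 1).map (pvDig s)).length + 1)).map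
        (fun k => ((((PySem.List.pyRange l (r+1) 1).map (pvDig s))).take k).sum)) j 0
      - PySem.List.pyGetD ((List.range (((PySem.List.pyRange l (r+1) 1).map (pvDig s)).length + 1)).map
        (fun k => ((((PySem.List.pyRange l (r+1) 1).map (pvDig s))).take k).sum)) i 0)
      = ((PySem.List.pyRange (l+i) (l+j) 1).map (pvDig s)).sum := by
  have hlen : ((PySem.List.pyRange l (r+1) 1).map (pvDig s)).length = (r+1-l).toNat := by
    simp [PySem.List.length_pyRange_one]
  rw [pref_getD _ j (by omega) (by rw [hlen]; omega),
      pref_getD _ i hi (by rw [hlen]; omega),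
      sub_sum_eq' (pvDig s) l r i j hi hij hj]

theorem ports_eq (s : String) (l : Int) (r : Int) (x : Int) (divisors : List Int) :
    is_x_prime s l r x divisors = is_x_prime_alt s l r x divisors := by
  simp only [is_x_prime, is_x_prime_alt]
  rw [prefFold_eq, pref_last]
  split_ifs with h
  · rfl
  · rw [Bool.eq_iff_iff]
    simp only [List.all_eq_true, PySem.List.mem_pyRange_one]
    have hlen : ((PySem.List.pyRange l (r+1) 1).map (pvDig s)).length = (r+1-l).toNat := by
      simp [PySem.List.length_pyRange_one]
    constructor
    · intro hA i hi j hj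
      by_cases hc : i = 0 ∧ j = (((PySem.List.pyRange l (r+1) 1).map (pvDig s)).length : Int)
      · simp [hc]
      · rw [if_neg hc]
        rw [hlen] at hc hi hj
        have hb := hA (l+i) (by omega) (l+j-1) (by omega)
        rw [if_neg (by omega), show l+j-1+1 = l+j from by ring] at hb
        rw [pref_diff s l r i j (by omega) (by omega) (by omega)]
        simpa [PySem.Set.mem_ofList] using hb
    · intro hB l2 hl2 r2 hr2
      by_cases hc : l2 = l ∧ r2 = r
      · simp [hc]
      · rw [if_neg hc]
        have hb := hB (l2-l) (by rw [hlen]; omega) (r2+1-l) (by rw [hlen]; omega)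
        rw [if_neg (by rw [hlen]; omega),
            pref_diff s l r (l2-l) (r2+1-l) (by omega) (by omega) (by omega),
            show l+(l2-l) = l2 from by ring, show l+(r2+1-l) = r2+1 from by ring] at hb
        simpa [PySem.Set.mem_ofList] using hb

-- ===== VERDICT (by name: the statement is the Claim_ definition above) =====
theorem is_x_prime_spec : Claim_equal_is_x_prime := by
  intro s l r x divisors _ _
  exact ports_eq s l r x divisors
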